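-- pv_equiv track=rewrite | github.com/GuopingYe/skyroc-admin | backend/scripts/sync_all_ct.py | group_versions_by_type
-- ===== SOURCE A (Python) =====
-- from collections import defaultdict
--
-- def group_versions_by_type(all_versions: list[str]) -> dict[str, list[str]]:
--     """将版本列表按 CT 类型分组"""
--     grouped: dict[str, list[str]] = defaultdict(list)
--     for version in all_versions:
--         # version 格式: sdtmct-2024-12-27
--         parts = version.split("-", 1)
--         if len(parts) >= 1:
--             ct_type = parts[0]
--             grouped[ct_type].append(version)
--
--     # 每个类型内按版本排序（降序，最新版本在前）
--     for ct_type in grouped: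
--         grouped[ct_type] = sorted(grouped[ct_type], reverse=True)
--
--     return dict(grouped)
-- ===== SOURCE B (Python) =====
-- def group_versions_by_type(all_versions: list[str]) -> dict[str, list[str]]:
--     """Group versions by CT-type prefix: seed empty buckets in first-occurrence
--     key order, then one append pass over the globally descending-sorted list,
--     so every bucket comes out already sorted (no per-bucket sort)."""
--     grouped = {v.split("-", 1)[0]: [] for v in all_versions}
--     for v in sorted(all_versions, reverse=True):
--         grouped[v.split("-", 1)[0]].append(v)
--     return grouped
-- ===== Notes on version B (the rewrite author's own statement) =====
-- stated objective: alternative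
-- what changed: A groups versions into a dict first and then sorts each bucket in a second per-key loop; B seeds empty buckets in first-occurrence key order, sorts the whole list descending once, and fills the buckets in a single append pass over that sorted list, so each bucket comes out already sorted and no per-bucket sorting loop is needed.
import Mathlib
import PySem

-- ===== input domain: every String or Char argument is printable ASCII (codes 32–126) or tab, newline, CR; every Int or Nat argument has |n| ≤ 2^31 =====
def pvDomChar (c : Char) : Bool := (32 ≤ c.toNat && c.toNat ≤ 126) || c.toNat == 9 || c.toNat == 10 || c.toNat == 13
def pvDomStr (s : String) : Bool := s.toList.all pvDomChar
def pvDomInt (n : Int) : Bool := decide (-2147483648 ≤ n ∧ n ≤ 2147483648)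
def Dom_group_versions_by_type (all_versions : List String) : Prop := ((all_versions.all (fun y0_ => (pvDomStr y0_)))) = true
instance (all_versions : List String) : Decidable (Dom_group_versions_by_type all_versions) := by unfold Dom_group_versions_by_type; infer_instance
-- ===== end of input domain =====

-- B seeds empty buckets in first-occurrence key order, then fills them in ONE append pass
-- over the globally descending-sorted list (so no per-bucket sort), instead of A's
-- group-first-then-sort-each-bucket loops; objective: alternative.

-- v.split("-", 1)[0]  (split with a non-empty separator always yields ≥ 1 piece, so [0] never raises)
def pvKey (v : String) : String := ((PySem.Str.splitMax? v "-" 1).getD []).headD ""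

-- ===== PORT A =====
def group_versions_by_type (all_versions : List String) : List (String × List String) :=
  let grouped : PySem.Dict String (List String) :=
    all_versions.foldl (fun d version =>
      let parts := (PySem.Str.splitMax? version "-" 1).getD []
      if 1 ≤ parts.length then
        -- ct_type = parts[0]; grouped[ct_type].append(version)  (parts is nonempty under the guard)
        d.modify (parts.headD "") [] (· ++ [version])
      else d) PySem.Dict.empty
  let grouped2 :=
    grouped.keys.foldl (fun d ct_type =>
      d.insert ct_type (PySem.List.sorted (d.getD ct_type []) (fun x => x) true)) grouped
  grouped2.items

-- ===== PORT B =====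
def group_versions_by_type_alt (all_versions : List String) : List (String × List String) :=
  let grouped : PySem.Dict String (List String) :=
    all_versions.foldl (fun d v => d.insert (pvKey v) []) PySem.Dict.empty
  let grouped2 :=
    (PySem.List.sorted all_versions (fun x => x) true).foldl
      -- grouped[v.split("-",1)[0]].append(v): the key is always already present,
      -- so d[k] = d.get(k, []) ++ [v] (Dict.modify) is exact here
      (fun d v => d.modify (pvKey v) [] (· ++ [v])) grouped
  grouped2.items

-- ===== PRECONDITION & SPEC =====
def Spec_group_versions_by_type (all_versions : List String) (out : List (String × List String)) : Prop := out = group_versions_by_type_alt all_versions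
instance (all_versions : List String) (out : List (String × List String)) : Decidable (Spec_group_versions_by_type all_versions out) := by unfold Spec_group_versions_by_type; infer_instance

-- ===== CLAIM (what is proved, stated in full; the proofs are below) =====
def Claim_equal_group_versions_by_type : Prop := ∀ (all_versions : List String), Dom_group_versions_by_type all_versions → Spec_group_versions_by_type all_versions (group_versions_by_type all_versions)

-- ===== LEMMAS AND PROOFS =====

-- split with a non-empty separator never returns the empty list
lemma splitOnMax_go_ne_nil (sep : List Char) :
    ∀ (fuel : Nat) (m : Nat) (l cur : List Char) (acc : List (List Char)),
      PySem.Chars.splitOnMax.go sep fuel m l cur acc ≠ [] := by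
  intro fuel
  induction fuel with
  | zero =>
    intro m l cur acc
    simp [PySem.Chars.splitOnMax.go]
  | succ n ih =>
    intro m l cur acc
    cases l with
    | nil => simp [PySem.Chars.splitOnMax.go]
    | cons c rest =>
      rw [PySem.Chars.splitOnMax.go]
      split_ifs with h1 h2
      · simp
      · exact ih _ _ _ _
      · exact ih _ _ _ _

lemma split1_ne_nil (v : String) : ((PySem.Str.splitMax? v "-" 1).getD []) ≠ [] := by
  simp [PySem.Str.splitMax?, PySem.Chars.splitMax?, PySem.Chars.splitOnMax, List.map_eq_nil_iff]
  exact splitOnMax_go_ne_nil _ _ _ _ _ _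

lemma map_pair_filter (l : List String) (k : String) :
    ((l.map (fun v => (pvKey v, v))).filter (fun p => p.1 == k)).map (·.2)
      = l.filter (fun v => pvKey v == k) := by
  induction l with
  | nil => simp
  | cons v t ih =>
    simp only [List.map_cons, List.filter_cons]
    cases h : (pvKey v == k)
    · simp [ih]
    · simp [ih]

lemma loop2_getD (F : List String → List String) :
    ∀ (ks : List String) (d : PySem.Dict String (List String)) (j : String), ks.Nodup →
      (ks.foldl (fun d k => d.insert k (F (d.getD k []))) d).getD j []
        = if j ∈ ks then F (d.getD j []) else d.getD j [] := by
  intro ks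
  induction ks with
  | nil => intro d j _; simp
  | cons k t ih =>
    intro d j hnd
    simp only [List.foldl_cons]
    rw [ih _ _ hnd.of_cons]
    by_cases hj : j ∈ t
    · have hjk : j ≠ k := by
        rintro rfl
        exact (List.nodup_cons.mp hnd).1 hj
      simp [hj, hjk, PySem.Dict.getD_insert, List.mem_cons]
    · by_cases hjk : j = k
      · subst hjk
        simp [hj]
      · simp [hj, hjk, PySem.Dict.getD_insert, List.mem_cons]

-- Set.update adds nothing when every element is already present
lemma set_update_self (s xs : List String) (h : ∀ x ∈ xs, x ∈ s) :
    PySem.Set.update s xs = s := by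
  rw [PySem.Set.update_eq_append_filter]
  have : (PySem.Set.ofList xs).filter (fun y => !(PySem.Set.contains s y)) = [] := by
    apply List.filter_eq_nil_iff.mpr
    intro a ha
    have hm : a ∈ s := h a ((PySem.Set.mem_ofList _ _).mp ha)
    simpa using hm
  rw [this, List.append_nil]

lemma loop2_keys (F : List String → List String)
    (ks : List String) (d : PySem.Dict String (List String)) (h : ∀ k ∈ ks, k ∈ d.keys) :
    (ks.foldl (fun d k => d.insert k (F (d.getD k []))) d).keys = d.keys := by
  rw [PySem.Dict.keys_foldl_insert]
  exact set_update_self _ _ h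

-- the bucket-seeding comprehension leaves every lookup (with default []) at []
lemma getD_seed :
    ∀ (l : List String) (d : PySem.Dict String (List String)),
      (∀ j, d.getD j [] = []) → ∀ k,
      (l.foldl (fun d v => d.insert (pvKey v) []) d).getD k [] = [] := by
  intro l
  induction l with
  | nil => intro d h k; exact h k
  | cons v t ih =>
    intro d h k
    simp only [List.foldl_cons]
    apply ih
    intro j
    by_cases hj : j = pvKey v <;> simp [PySem.Dict.getD_insert, hj, h j]

lemma sorted_filter_comm (p : String → Bool) (l : List String) :
    PySem.List.sorted (l.filter p) (fun x => x) true
      = (PySem.List.sorted l (fun x => x) true).filter p := by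
  have hperm : (PySem.List.sorted (l.filter p) (fun x => x) true).Perm
      ((PySem.List.sorted l (fun x => x) true).filter p) :=
    (PySem.List.sorted_perm _ _ _).trans ((PySem.List.sorted_perm l _ _).filter p).symm
  exact hperm.eq_of_pairwise (fun a b _ _ x y => le_antisymm y x)
    (PySem.List.sorted_pairwise_rev (l.filter p) (fun x : String => x))
    ((PySem.List.sorted_pairwise_rev l (fun x : String => x)).filter p)

-- both programs produce the same canonical table: first-occurrence keys, each bucket a
-- descending-sorted filter of the input
lemma portA_canonical (l : List String) :
    group_versions_by_type l
      = (PySem.List.dedup (l.map pvKey)).map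
          (fun k => (k, PySem.List.sorted (l.filter (fun v => pvKey v == k)) (fun x => x) true)) := by
  unfold group_versions_by_type
  have hstep : (fun (d : PySem.Dict String (List String)) version =>
      let parts := (PySem.Str.splitMax? version "-" 1).getD []
      if 1 ≤ parts.length then d.modify (parts.headD "") [] (· ++ [version]) else d)
      = (fun d v => d.modify (pvKey v) [] (· ++ [v])) := by
    funext d v
    have h := split1_ne_nil v
    have hlen : 1 ≤ ((PySem.Str.splitMax? v "-" 1).getD []).length :=
      Nat.one_le_iff_ne_zero.mpr (fun hc => h (List.length_eq_zero_iff.mp hc))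
    simp [pvKey, hlen]
  rw [hstep]
  have hmap : l.foldl (fun d v => d.modify (pvKey v) [] (· ++ [v])) PySem.Dict.empty
      = (l.map (fun v => (pvKey v, v))).foldl (fun d p => d.modify p.1 [] (· ++ [p.2])) PySem.Dict.empty := by
    rw [List.foldl_map]
  rw [hmap]
  set grouped := (l.map (fun v => (pvKey v, v))).foldl
      (fun d p => d.modify p.1 [] (· ++ [p.2])) PySem.Dict.empty with hg
  have hkeys : grouped.keys = PySem.List.dedup (l.map pvKey) := by
    rw [hg, PySem.Dict.keys_foldl_modify_key, List.map_map]
    have hc : (Prod.fst ∘ fun v => (pvKey v, v)) = pvKey := rfl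
    rw [hc]
    simp [PySem.Set.update_nil_left, PySem.List.dedup_eq_ofList, PySem.Dict.keys_empty]
  have hnodup : grouped.keys.Nodup := by
    rw [hg]
    exact PySem.Dict.nodup_keys_foldl_modify_key _ _ _ _ _ (by simp [PySem.Dict.keys_empty])
  have hgetD : ∀ k, grouped.getD k [] = l.filter (fun v => pvKey v == k) := by
    intro k
    rw [hg, PySem.Dict.getD_foldl_modify_append]
    simp [map_pair_filter]
  set F : List String → List String := fun xs => PySem.List.sorted xs (fun x : String => x) true with hF
  have hk2 := loop2_keys F grouped.keys grouped (fun k hk => hk)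
  have hnodup2 : (grouped.keys.foldl (fun d k => d.insert k (F (d.getD k []))) grouped).keys.Nodup := by
    rw [hk2]; exact hnodup
  rw [PySem.Dict.items_eq_map_keys _ hnodup2 []]
  rw [hk2, show PySem.List.dedup (l.map pvKey) = grouped.keys from hkeys.symm]
  apply List.map_congr_left
  intro k hmem
  rw [loop2_getD F grouped.keys grouped k hnodup, if_pos hmem, hgetD]

lemma portB_canonical (l : List String) :
    group_versions_by_type_alt l
      = (PySem.List.dedup (l.map pvKey)).map
          (fun k => (k, PySem.List.sorted (l.filter (fun v => pvKey v == k)) (fun x => x) true)) := by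
  unfold group_versions_by_type_alt
  show ((PySem.List.sorted l (fun x => x) true).foldl (fun d v => d.modify (pvKey v) [] (· ++ [v]))
      (l.foldl (fun d v => d.insert (pvKey v) []) PySem.Dict.empty)).items = _
  set groupedB := l.foldl (fun d v => d.insert (pvKey v) ([] : List String)) PySem.Dict.empty with hgB
  have hkeysB : groupedB.keys = PySem.List.dedup (l.map pvKey) := by
    rw [hgB, PySem.Dict.keys_foldl_insert_key]
    simp [PySem.Set.update_nil_left, PySem.List.dedup_eq_ofList, PySem.Dict.keys_empty]
  have hnodupB : groupedB.keys.Nodup := by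
    rw [hgB]
    exact PySem.Dict.nodup_keys_foldl_insert_key _ _ _ _ (by simp [PySem.Dict.keys_empty])
  have hseed : ∀ k, groupedB.getD k [] = [] := by
    intro k
    rw [hgB]
    exact getD_seed l PySem.Dict.empty (fun j => by simp [PySem.Dict.getD_empty]) k
  set srt := PySem.List.sorted l (fun x : String => x) true with hsrt
  have hmapB : srt.foldl (fun d v => d.modify (pvKey v) [] (· ++ [v])) groupedB
      = (srt.map (fun v => (pvKey v, v))).foldl (fun d p => d.modify p.1 [] (· ++ [p.2])) groupedB := by
    rw [List.foldl_map]
  rw [hmapB]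
  set grouped2 := (srt.map (fun v => (pvKey v, v))).foldl
      (fun d p => d.modify p.1 [] (· ++ [p.2])) groupedB with hg2
  have hkeys2 : grouped2.keys = groupedB.keys := by
    rw [hg2, PySem.Dict.keys_foldl_modify_key, List.map_map]
    have hc : (Prod.fst ∘ fun v => (pvKey v, v)) = pvKey := rfl
    rw [hc]
    apply set_update_self
    intro x hx
    obtain ⟨v, hv, rfl⟩ := List.mem_map.mp hx
    have hvl : v ∈ l := by
      rw [hsrt] at hv
      simpa [PySem.List.mem_sorted] using hv
    rw [hkeysB]
    exact (PySem.List.mem_dedup _ _).mpr (List.mem_map_of_mem hvl)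
  have hnodup2 : grouped2.keys.Nodup := by rw [hkeys2]; exact hnodupB
  have hgetD2 : ∀ k, grouped2.getD k [] = srt.filter (fun v => pvKey v == k) := by
    intro k
    rw [hg2, PySem.Dict.getD_foldl_modify_append, hseed k]
    simp [map_pair_filter]
  rw [PySem.Dict.items_eq_map_keys _ hnodup2 []]
  rw [hkeys2, hkeysB]
  apply List.map_congr_left
  intro k _
  rw [hgetD2, sorted_filter_comm]

-- ===== VERDICT (by name: the statement is the Claim_ definition above) =====
theorem group_versions_by_type_spec : Claim_equal_group_versions_by_type := by
  intro l _
  unfold Spec_group_versions_by_type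
  rw [portA_canonical, portB_canonical]
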